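-- pv_equiv track=rewrite | github.com/marlcplhra/SSCard | compares/lplm/correct_ground_truth.py | language_to_query
-- ===== SOURCE A (Python) =====
-- def language_to_query(list_languages):
--     list_queries = []
--     list_wildcards = ['$', '%', '_', '@']
--     for con in list_languages:
--         list_pairs = []
--         for l in con:
--             query = ''
--             l_ = l.replace('%^', '_').replace('^%', '_').replace('^', '_').replace('@', ' ')
--             for i in range(len(l_)):
--                 if len(query) == 0:
--                     query += l_[i]
--                 else:
--
--                     if query[-1] not in list_wildcards and l_[i] not in list_wildcards:
--                         query += '%' + l_[i]
--                     else:
--                         query += l_[i]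
--             list_pairs.append(query.replace('$', ''))
--         list_queries.append(list_pairs)
--     return list_queries
-- ===== SOURCE B (Python) =====
-- def language_to_query(list_languages):
--     return [[_to_query(l) for l in con] for con in list_languages]
--
--
-- def _to_query(l):
--     wc = '$%_@'
--     l_ = l.replace('%^', '_').replace('^%', '_').replace('^', '_').replace('@', ' ')
--     parts = []
--     run = ''
--     for c in l_:
--         if c in wc:
--             if run:
--                 parts.append('%'.join(run))
--                 run = ''
--             parts.append(c)
--         else:
--             run += c
--     if run:
--         parts.append('%'.join(run))
--     return ''.join(parts).replace('$', '')
-- ===== Notes on version B (the rewrite author's own statement) =====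
-- stated objective: alternative
-- what changed: Replaced the per-character accumulator loop that inspects query[-1] with a run-splitting algorithm: split the string into maximal runs of non-wildcard characters, '%'-join each run, and concatenate runs and wildcards back; outer loops become nested comprehensions.
import Mathlib
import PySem

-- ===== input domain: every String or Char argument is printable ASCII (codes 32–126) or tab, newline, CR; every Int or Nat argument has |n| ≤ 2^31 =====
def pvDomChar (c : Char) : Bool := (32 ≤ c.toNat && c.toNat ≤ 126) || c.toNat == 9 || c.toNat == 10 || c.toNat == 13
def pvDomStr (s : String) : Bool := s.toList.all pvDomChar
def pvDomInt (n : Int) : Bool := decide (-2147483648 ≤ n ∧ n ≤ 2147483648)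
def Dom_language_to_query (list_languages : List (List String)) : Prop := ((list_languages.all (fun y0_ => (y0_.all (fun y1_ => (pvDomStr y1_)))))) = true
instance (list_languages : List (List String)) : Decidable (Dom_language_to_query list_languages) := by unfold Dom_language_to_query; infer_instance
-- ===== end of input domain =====

-- B replaces A's lookback accumulator loop by '%'-joining maximal non-wildcard runs (alternative algorithm, same cost).

-- ===== PORT A =====
def pvWcA : List Char := ['$', '%', '_', '@']

-- the .replace chain shared by both Pythons
def pvRepl (l : String) : String :=
  PySem.Str.replace (PySem.Str.replace (PySem.Str.replace (PySem.Str.replace l "%^" "_") "^%" "_") "^" "_") "@" " "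

def language_to_query (list_languages : List (List String)) : List (List String) :=
  list_languages.foldl (fun list_queries con =>
    list_queries ++ [con.foldl (fun list_pairs l =>
      let lcs := (pvRepl l).toList
      -- for i in range(len(l_)): indexing l_[i]; query[-1] via pyGetD (query nonempty in that branch, so the default is never used)
      let query := (PySem.List.pyRange 0 (lcs.length : Int) 1).foldl (fun query i =>
        let c := PySem.List.pyGetD lcs i ' '
        if query.length = 0 then query ++ [c]
        else if !(pvWcA.contains (PySem.List.pyGetD query (-1) ' ')) && !(pvWcA.contains c) then
          query ++ ['%', c]
        else query ++ [c]) ([] : List Char)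
      list_pairs ++ [String.mk (PySem.Chars.replace query ['$'] [])]) []]) []

-- ===== PORT B =====
def pvWcB : List Char := "$%_@".toList

def pvToQueryAlt (l : String) : String :=
  let lcs := (pvRepl l).toList
  let st := lcs.foldl (fun (st : List (List Char) × List Char) c =>
      if pvWcB.contains c then
        (st.1 ++ (if st.2 ≠ [] then [List.intersperse '%' st.2] else []) ++ [[c]], [])
      else (st.1, st.2 ++ [c])) ([], [])
  let parts := st.1 ++ (if st.2 ≠ [] then [List.intersperse '%' st.2] else [])
  String.mk (PySem.Chars.replace parts.flatten ['$'] [])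

def language_to_query_alt (list_languages : List (List String)) : List (List String) :=
  list_languages.map (fun con => con.map pvToQueryAlt)

-- ===== PRECONDITION & SPEC =====
def Spec_language_to_query (list_languages : List (List String)) (out : List (List String)) : Prop := out = language_to_query_alt list_languages
instance (list_languages : List (List String)) (out : List (List String)) : Decidable (Spec_language_to_query list_languages out) := by unfold Spec_language_to_query; infer_instance

-- ===== CLAIM (what is proved, stated in full; the proofs are below) =====
def Claim_equal_language_to_query : Prop := ∀ (list_languages : List (List String)), Dom_language_to_query list_languages → Spec_language_to_query list_languages (language_to_query list_languages)

-- ===== LEMMAS AND PROOFS =====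

-- common specification: g' b cs inserts '%' before c exactly when the previous char and c are both non-wildcard
def pvG (b : Bool) : List Char → List Char
  | [] => []
  | c :: cs => (if b && !(pvWcA.contains c) then ['%', c] else [c]) ++ pvG (!(pvWcA.contains c)) cs

def pvStepA (query : List Char) (c : Char) : List Char :=
  if query.length = 0 then query ++ [c]
  else if !(pvWcA.contains (PySem.List.pyGetD query (-1) ' ')) && !(pvWcA.contains c) then
    query ++ ['%', c]
  else query ++ [c]

def pvLastFlag (q : List Char) : Bool :=
  match q.getLast? with
  | none => false
  | some p => !(pvWcA.contains p)

lemma pvPyGetD_concat_neg_one (q : List Char) (x : Char) (d : Char) :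
    PySem.List.pyGetD (q ++ [x]) (-1) d = x := by
  simp [PySem.List.pyGetD, PySem.List.pyGet?, PySem.List.pyIdx?]

lemma pvFoldA (cs : List Char) : ∀ q : List Char,
    cs.foldl pvStepA q = q ++ pvG (pvLastFlag q) cs := by
  induction cs with
  | nil => intro q; simp [pvG]
  | cons c cs ih =>
    intro q
    rcases List.eq_nil_or_concat q with h | ⟨q', x, h⟩
    · subst h
      simp [pvStepA, pvLastFlag, pvG, ih]
    · subst h
      simp only [List.foldl_cons, ih]
      by_cases hx : x ∈ pvWcA <;> by_cases hc : c ∈ pvWcA <;>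
        simp [pvStepA, pvG, pvPyGetD_concat_neg_one, hx, hc, pvLastFlag,
          List.getLast?_append, List.append_assoc]

def pvStepB (st : List (List Char) × List Char) (c : Char) : List (List Char) × List Char :=
  if pvWcB.contains c then
    (st.1 ++ (if st.2 ≠ [] then [List.intersperse '%' st.2] else []) ++ [[c]], [])
  else (st.1, st.2 ++ [c])

lemma pvWcB_eq : pvWcB = pvWcA := by decide

lemma pvIntersperse_concat (run : List Char) (c : Char) (hr : run ≠ []) :
    List.intersperse '%' (run ++ [c]) = List.intersperse '%' run ++ ['%', c] := by
  induction run with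
  | nil => simp at hr
  | cons a t ih =>
    cases t with
    | nil => simp [List.intersperse]
    | cons b t' =>
      simp only [List.cons_append, List.intersperse_cons₂] at *
      simp [ih]

lemma pvMem_wcB_iff (c : Char) : c ∈ pvWcB ↔ c ∈ pvWcA := by rw [pvWcB_eq]

lemma pvFoldB (cs : List Char) : ∀ (parts : List (List Char)) (run : List Char),
    (let st := cs.foldl pvStepB (parts, run)
     (st.1 ++ (if st.2 ≠ [] then [List.intersperse '%' st.2] else [])).flatten) =
    parts.flatten ++ List.intersperse '%' run ++ pvG (!decide (run = [])) cs := by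
  induction cs with
  | nil =>
    intro parts run
    cases run with
    | nil => simp [pvG, List.intersperse]
    | cons a t => simp [pvG]
  | cons c cs ih =>
    intro parts run
    simp only [List.foldl_cons]
    by_cases hc : c ∈ pvWcA
    · rw [show pvStepB (parts, run) c =
        (parts ++ (if run ≠ [] then [List.intersperse '%' run] else []) ++ [[c]], []) by
          simp [pvStepB, (pvMem_wcB_iff c).mpr hc]]
      rw [ih]
      cases run with
      | nil => simp [pvG, hc, List.intersperse]
      | cons a t => simp [pvG, hc, List.append_assoc]
    · have hc2 : c ∉ pvWcB := fun h => hc ((pvMem_wcB_iff c).mp h)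
      rw [show pvStepB (parts, run) c = (parts, run ++ [c]) by simp [pvStepB, hc2]]
      rw [ih]
      cases hr : run with
      | nil => simp [pvG, hc, List.intersperse]
      | cons a t =>
        rw [← hr, pvIntersperse_concat run c (by simp [hr])]
        simp [pvG, hc, hr, List.append_assoc]

lemma pvInner_eq (l : String) :
    ((PySem.List.pyRange 0 (((pvRepl l).toList).length : Int) 1).foldl (fun query i =>
        let c := PySem.List.pyGetD ((pvRepl l).toList) i ' '
        if query.length = 0 then query ++ [c]
        else if !(pvWcA.contains (PySem.List.pyGetD query (-1) ' ')) && !(pvWcA.contains c) then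
          query ++ ['%', c]
        else query ++ [c]) ([] : List Char)) =
    (let st := ((pvRepl l).toList).foldl pvStepB ([], [])
     (st.1 ++ (if st.2 ≠ [] then [List.intersperse '%' st.2] else [])).flatten) := by
  have h := PySem.List.foldl_pyRange_pyGetD (a := 0) (xs := (pvRepl l).toList) (d := ' ')
    (f := pvStepA) (init := ([] : List Char)) (by norm_num)
  simp only [PySem.List.len] at h
  rw [show (fun (query : List Char) (i : Int) =>
        let c := PySem.List.pyGetD ((pvRepl l).toList) i ' '
        if query.length = 0 then query ++ [c]
        else if !(pvWcA.contains (PySem.List.pyGetD query (-1) ' ')) && !(pvWcA.contains c) then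
          query ++ ['%', c]
        else query ++ [c]) =
      (fun (acc : List Char) (j : Int) => pvStepA acc (PySem.List.pyGetD ((pvRepl l).toList) j ' '))
    from rfl]
  rw [h]
  rw [pvFoldA, pvFoldB]
  simp [pvLastFlag, List.intersperse]

-- ===== VERDICT (by name: the statement is the Claim_ definition above) =====
theorem language_to_query_spec : Claim_equal_language_to_query := by
  intro list_languages _
  unfold Spec_language_to_query language_to_query language_to_query_alt
  rw [PySem.List.foldl_append_singleton_eq_map]
  simp only [List.nil_append]
  refine List.map_congr_left (fun con _ => ?_)
  rw [PySem.List.foldl_append_singleton_eq_map]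
  simp only [List.nil_append]
  refine List.map_congr_left (fun l _ => ?_)
  unfold pvToQueryAlt
  simp only []
  rw [pvInner_eq l]
  rfl
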